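-- pv_equiv track=rewrite | github.com/clifford-cheng/WealthPipeline | wealth_leads/territory.py | exclusivity_key_for_lead
-- ===== SOURCE A (Python) =====
-- def exclusivity_key_for_lead(lead_keys: list[str]) -> str:
--     """
--     Single key used for 'one client per region' default.
--     Prefer state; else first zip; else METRO:hash of hq — use first key.
--     """
--     for k in lead_keys:
--         if k.startswith("US-ST-"):
--             return k
--     for k in lead_keys:
--         if k.startswith("US-ZIP-"):
--             return k
--     return ""
-- ===== SOURCE B (Python) =====
-- def exclusivity_key_for_lead(lead_keys: list[str]) -> str:
--     first_zip = None
--     for k in lead_keys: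
--         if k.startswith("US-ST-"):
--             return k
--         if first_zip is None and k.startswith("US-ZIP-"):
--             first_zip = k
--     return first_zip if first_zip is not None else ""
-- ===== Notes on version B (the rewrite author's own statement) =====
-- stated objective: alternative
-- what changed: Replaced A's two sequential scans (one for a state key, a second full scan for a zip key) with a single pass that returns on the first state key and remembers only the first zip key in an accumulator.
import Mathlib
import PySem

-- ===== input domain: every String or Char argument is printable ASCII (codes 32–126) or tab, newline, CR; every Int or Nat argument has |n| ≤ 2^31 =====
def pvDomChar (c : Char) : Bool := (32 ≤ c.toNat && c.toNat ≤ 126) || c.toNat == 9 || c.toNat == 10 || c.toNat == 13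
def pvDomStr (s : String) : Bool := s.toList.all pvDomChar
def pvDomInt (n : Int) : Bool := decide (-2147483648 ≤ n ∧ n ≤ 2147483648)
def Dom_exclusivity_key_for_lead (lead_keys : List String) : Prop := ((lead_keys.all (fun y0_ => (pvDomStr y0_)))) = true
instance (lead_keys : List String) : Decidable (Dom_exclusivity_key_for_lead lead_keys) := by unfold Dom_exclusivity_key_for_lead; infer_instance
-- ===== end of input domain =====

-- B replaces A's two sequential scans with one pass that remembers the first zip key (alternative decomposition, same behaviour).
-- ===== PORT A =====
-- first for-loop of A: return the first key starting with "US-ST-"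
def pvA_stLoop (ks : List String) : Option String :=
  match ks with
  | [] => none
  | k :: t => if PySem.Str.startswith k "US-ST-" then some k else pvA_stLoop t

-- second for-loop of A: return the first key starting with "US-ZIP-"
def pvA_zipLoop (ks : List String) : Option String :=
  match ks with
  | [] => none
  | k :: t => if PySem.Str.startswith k "US-ZIP-" then some k else pvA_zipLoop t

def exclusivity_key_for_lead (lead_keys : List String) : String :=
  match pvA_stLoop lead_keys with
  | some k => k
  | none =>
    match pvA_zipLoop lead_keys with
    | some k => k
    | none => ""

-- ===== PORT B =====
-- single loop of B, carrying the first_zip accumulator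
def pvB_loop (ks : List String) (firstZip : Option String) : String :=
  match ks with
  | [] => match firstZip with | some z => z | none => ""
  | k :: t =>
    if PySem.Str.startswith k "US-ST-" then k
    else if firstZip.isNone && PySem.Str.startswith k "US-ZIP-" then pvB_loop t (some k)
    else pvB_loop t firstZip

def exclusivity_key_for_lead_alt (lead_keys : List String) : String :=
  pvB_loop lead_keys none

-- ===== PRECONDITION & SPEC =====
def Spec_exclusivity_key_for_lead (lead_keys : List String) (out : String) : Prop := out = exclusivity_key_for_lead_alt lead_keys
instance (lead_keys : List String) (out : String) : Decidable (Spec_exclusivity_key_for_lead lead_keys out) := by unfold Spec_exclusivity_key_for_lead; infer_instance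

-- ===== CLAIM (what is proved, stated in full; the proofs are below) =====
def Claim_equal_exclusivity_key_for_lead : Prop := ∀ (lead_keys : List String), Dom_exclusivity_key_for_lead lead_keys → Spec_exclusivity_key_for_lead lead_keys (exclusivity_key_for_lead lead_keys)

-- ===== LEMMAS AND PROOFS =====

-- Loop invariant: B's single pass equals A's two-scan result with the accumulator folded in.
theorem pvB_loop_eq (ks : List String) (acc : Option String) :
    pvB_loop ks acc =
      match pvA_stLoop ks with
      | some k => k
      | none =>
        match acc.orElse (fun _ => pvA_zipLoop ks) with
        | some k => k
        | none => "" := by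
  induction ks generalizing acc with
  | nil => cases acc <;> simp [pvB_loop, pvA_stLoop, pvA_zipLoop, Option.orElse]
  | cons k t ih =>
    simp only [pvB_loop, pvA_stLoop, pvA_zipLoop]
    by_cases hst : PySem.Chars.startswith k.toList ['U','S','-','S','T','-'] = true
    · simp [hst]
    · by_cases hz : PySem.Chars.startswith k.toList ['U','S','-','Z','I','P','-'] = true
      · cases acc <;> simp [hst, hz, ih, Option.orElse]
      · cases acc <;> simp [hst, hz, ih, Option.orElse]

-- ===== VERDICT (by name: the statement is the Claim_ definition above) =====
theorem exclusivity_key_for_lead_spec : Claim_equal_exclusivity_key_for_lead := by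
  intro ks _
  show _ = _
  rw [exclusivity_key_for_lead_alt, pvB_loop_eq, exclusivity_key_for_lead]
  simp [Option.orElse]
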